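-- pv_equiv track=rewrite | github.com/shuvo1165/Problem_Solving_with_Python | array-hash-URI-problem-1257.py | mymethod
-- ===== SOURCE A (Python) =====
-- def mymethod(n,lengths,strings):
-- 	u = 0
-- 	i = 0
-- 	l = 0
-- 	result = []
-- 	while i <n:
-- 		j = 0
-- 		count = 0
-- 		while j < lengths[l]:
-- 			s = strings[u]
-- 			k = 0
-- 			while k < len(s):
-- 				ap = ord(s[k])-65
-- 				ei = j
-- 				pe = k
--
-- 				count = count + ap + ei + pe
-- 				k = k+1
-- 			u = u+1
-- 			j = j+1
-- 		result.append(count)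
-- 		l = l+1
-- 		i = i+1
-- 	return result
-- ===== SOURCE B (Python) =====
-- def mymethod(n, lengths, strings):
--     # Per string, replace the per-character index loop by a closed form:
--     # sum(ord) - 65*m + m*j + m*(m-1)//2
--     result = []
--     u = 0
--     for l in range(n):
--         count = 0
--         for j in range(lengths[l]):
--             s = strings[u]
--             u += 1
--             m = len(s)
--             count += sum(map(ord, s)) - 65 * m + m * j + m * (m - 1) // 2
--         result.append(count)
--     return result
-- ===== Notes on version B (the rewrite author's own statement) =====
-- stated objective: alternative
-- what changed: The three nested index-counter while-loops are replaced by a flat for-in-range pass that computes each string's contribution with a closed-form arithmetic term (char-code sum - 65*m + m*j + m*(m-1)//2) instead of accumulating j+k character by character.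
import Mathlib
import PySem

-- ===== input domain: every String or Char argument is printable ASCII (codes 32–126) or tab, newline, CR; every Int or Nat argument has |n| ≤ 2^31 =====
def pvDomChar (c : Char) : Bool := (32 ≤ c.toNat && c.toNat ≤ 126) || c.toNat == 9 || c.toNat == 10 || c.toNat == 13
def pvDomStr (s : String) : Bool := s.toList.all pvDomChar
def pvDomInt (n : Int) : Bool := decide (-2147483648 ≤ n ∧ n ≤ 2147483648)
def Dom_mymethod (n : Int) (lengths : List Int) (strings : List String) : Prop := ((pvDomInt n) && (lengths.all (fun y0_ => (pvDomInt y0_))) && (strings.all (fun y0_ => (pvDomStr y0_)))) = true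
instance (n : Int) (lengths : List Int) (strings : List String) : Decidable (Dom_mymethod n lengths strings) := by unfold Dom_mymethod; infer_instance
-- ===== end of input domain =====

-- B replaces A's innermost per-character index loop by a per-string closed-form term; alternative decomposition, return value only.

-- ===== PORT A =====
-- innermost 'while k < len(s)' loop: state (k, count)
def pvAk (s : List Char) (j k count : Int) : Int :=
  match s with
  | [] => count
  | c :: rest => pvAk rest j (k + 1) (count + ((c.toNat : Int) - 65) + j + k)

-- middle 'while j < lengths[l]' loop, fuel = (lengths[l] - j).toNat; returns (count, u).
-- index out of range returns a default (Python raises there; excluded by Pre_)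
def pvAj (strings : List String) (fj : Nat) (u j count : Int) : Int × Int :=
  match fj with
  | 0 => (count, u)
  | Nat.succ fj' =>
      let s := (PySem.List.pyGet? strings u).getD ""
      pvAj strings fj' (u + 1) (j + 1) (pvAk s.toList j 0 count)

-- outer 'while i < n' loop, fuel = (n - i).toNat
def pvAi (lengths : List Int) (strings : List String) (fi : Nat) (u l : Int) : List Int :=
  match fi with
  | 0 => []
  | Nat.succ fi' =>
      let L := (PySem.List.pyGet? lengths l).getD 0
      let r := pvAj strings L.toNat u 0 0
      r.1 :: pvAi lengths strings fi' r.2 (l + 1)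

def mymethod (n : Int) (lengths : List Int) (strings : List String) : List Int :=
  pvAi lengths strings n.toNat 0 0

-- ===== PORT B =====
def pvCharSum (s : List Char) : Int := (s.map (fun c => (c.toNat : Int))).sum

-- for j in range(lengths[l]): closed-form contribution of strings[u]; state (u, count)
def pvBgroup (strings : List String) (L : Int) (u : Int) : Int × Int :=
  (PySem.List.pyRange 0 L 1).foldl
    (fun st j =>
      let s := ((PySem.List.pyGet? strings st.1).getD "").toList
      let m : Int := s.length
      (st.1 + 1, st.2 + (pvCharSum s - 65 * m + m * j + PySem.Int.floordiv (m * (m - 1)) 2)))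
    (u, 0)

def mymethod_alt (n : Int) (lengths : List Int) (strings : List String) : List Int :=
  ((PySem.List.pyRange 0 n 1).foldl
    (fun (st : Int × List Int) l =>
      let L := (PySem.List.pyGet? lengths l).getD 0
      let r := pvBgroup strings L st.1
      (r.1, st.2 ++ [r.2]))
    (0, [])).2

-- ===== PRECONDITION & SPEC =====
-- Exactly the inputs where Python A returns (no IndexError): every group index below n is
-- a valid index into lengths, and the total number of strings consumed fits in strings.
def Pre_mymethod (n : Int) (lengths : List Int) (strings : List String) : Prop :=
  n ≤ (lengths.length : Int) ∧
  (((lengths.take n.toNat).map (fun x => max x 0)).sum ≤ (strings.length : Int))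
instance (n : Int) (lengths : List Int) (strings : List String) : Decidable (Pre_mymethod n lengths strings) := by unfold Pre_mymethod; infer_instance

def pvWitness_mymethod : Int × List Int × List String := (2, [2, 1], ["Ab", "", "z!"])

def Spec_mymethod (n : Int) (lengths : List Int) (strings : List String) (out : List Int) : Prop := out = mymethod_alt n lengths strings
instance (n : Int) (lengths : List Int) (strings : List String) (out : List Int) : Decidable (Spec_mymethod n lengths strings out) := by unfold Spec_mymethod; infer_instance

-- ===== CLAIM (what is proved, stated in full; the proofs are below) =====
def Claim_equal_mymethod : Prop := ∀ (n : Int) (lengths : List Int) (strings : List String), Dom_mymethod n lengths strings → Pre_mymethod n lengths strings → Spec_mymethod n lengths strings (mymethod n lengths strings)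

-- ===== LEMMAS AND PROOFS =====

-- triangular numbers Σ_{i<m} i
def pvTri : Nat → Int
  | 0 => 0
  | Nat.succ m => pvTri m + m

lemma pvTri_eq_floordiv (m : Nat) :
    PySem.Int.floordiv ((m : Int) * ((m : Int) - 1)) 2 = pvTri m := by
  have h2 : 2 * pvTri m = (m : Int) * ((m : Int) - 1) := by
    induction m with
    | zero => simp [pvTri]
    | succ k ih => simp only [pvTri]; push_cast; ring_nf; ring_nf at ih; omega
  rw [← h2, PySem.Int.floordiv_eq_ediv_of_pos (by norm_num)]
  exact Int.mul_ediv_cancel_left _ (by norm_num)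

lemma pvAk_closed (s : List Char) (j k count : Int) :
    pvAk s j k count =
      count + pvCharSum s + (s.length : Int) * (j - 65 + k) + pvTri s.length := by
  induction s generalizing k count with
  | nil => simp [pvAk, pvCharSum, pvTri]
  | cons c rest ih =>
      simp only [pvAk, ih, pvCharSum, List.map_cons, List.sum_cons, List.length_cons, pvTri]
      push_cast
      ring

-- the inner loops agree: B's fold over range(j, L) equals A's fuelled j-loop (count shifted by B's per-group accumulator)
lemma pvInner_agree (strings : List String) (L : Int) (fj : Nat) (u j count : Int)
    (hfj : fj = (L - j).toNat) :
    (PySem.List.pyRange j L 1).foldl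
      (fun st jj =>
        let s := ((PySem.List.pyGet? strings st.1).getD "").toList
        let m : Int := s.length
        (st.1 + 1, st.2 + (pvCharSum s - 65 * m + m * jj + PySem.Int.floordiv (m * (m - 1)) 2)))
      (u, count)
    = ((pvAj strings fj u j count).2, (pvAj strings fj u j count).1) := by
  induction fj generalizing u j count with
  | zero =>
      have : L ≤ j := by omega
      rw [PySem.List.pyRange_one_eq_nil this]
      simp [pvAj]
  | succ fj' ih =>
      have hjL : j < L := by omega
      rw [PySem.List.pyRange_one_cons hjL]
      simp only [List.foldl_cons]
      rw [ih (u + 1) (j + 1) _ (by omega)]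
      simp only [pvAj]
      have hc : pvAk ((PySem.List.pyGet? strings u).getD "").toList j 0 count
          = count + (pvCharSum ((PySem.List.pyGet? strings u).getD "").toList
              - 65 * ((((PySem.List.pyGet? strings u).getD "").toList.length : Int))
              + ((((PySem.List.pyGet? strings u).getD "").toList.length : Int)) * j
              + PySem.Int.floordiv (((((PySem.List.pyGet? strings u).getD "").toList.length : Int))
                  * (((((PySem.List.pyGet? strings u).getD "").toList.length : Int)) - 1)) 2) := by
        rw [pvAk_closed, pvTri_eq_floordiv]; ring
      rw [hc]

-- the outer loops agree: B's fold over range(l, n) extends acc by A's fuelled outer loop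
lemma pvOuter_agree (lengths : List Int) (strings : List String) (n : Int) (fi : Nat)
    (l u : Int) (acc : List Int) (hfi : fi = (n - l).toNat) :
    ((PySem.List.pyRange l n 1).foldl
      (fun (st : Int × List Int) ll =>
        let L := (PySem.List.pyGet? lengths ll).getD 0
        let r := pvBgroup strings L st.1
        (r.1, st.2 ++ [r.2]))
      (u, acc)).2
    = acc ++ pvAi lengths strings fi u l := by
  induction fi generalizing l u acc with
  | zero =>
      have : n ≤ l := by omega
      rw [PySem.List.pyRange_one_eq_nil this]
      simp [pvAi]
  | succ fi' ih =>
      have hl : l < n := by omega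
      rw [PySem.List.pyRange_one_cons hl]
      simp only [List.foldl_cons]
      have hb : pvBgroup strings ((PySem.List.pyGet? lengths l).getD 0) u
          = ((pvAj strings ((PySem.List.pyGet? lengths l).getD 0).toNat u 0 0).2,
             (pvAj strings ((PySem.List.pyGet? lengths l).getD 0).toNat u 0 0).1) := by
        rw [pvBgroup]
        exact pvInner_agree strings _ _ u 0 0 (by omega)
      rw [hb, ih (l + 1) _ _ (by omega)]
      simp [pvAi]

theorem mymethod_spec : Claim_equal_mymethod := by
  intro n lengths strings _ _
  unfold Spec_mymethod mymethod mymethod_alt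
  rw [pvOuter_agree lengths strings n n.toNat 0 0 [] (by omega)]
  simp
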